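-- pv_equiv track=rewrite | github.com/SindhujaR06/HANDWRITTEN-TEXT-RECOGNITION-USING-CNN | ocr2.py | event_window_technique
-- ===== SOURCE A (Python) =====
-- def event_window_technique(projection, threshold=100):
--     segments = []
--     segment = []
--     for i, value in enumerate(projection):
--         if value > threshold:
--             segment.append(i)
--         else:
--             if segment:
--                 segments.append(segment)
--                 segment = []
--     if segment:  # Add last segment if it exists
--         segments.append(segment)
--     return segments
-- ===== SOURCE B (Python) =====
-- def event_window_technique(projection, threshold=100):
--     above = [i for i, v in enumerate(projection) if v > threshold]
--     runs = []
--     for i in above: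
--         if runs and runs[-1][-1] == i - 1:
--             runs[-1].append(i)
--         else:
--             runs.append([i])
--     return runs
-- ===== Notes on version B (the rewrite author's own statement) =====
-- stated objective: alternative
-- what changed: Replaced A's single stateful flush-the-buffer scan with two passes: a comprehension collecting above-threshold indices followed by a pass splitting that flat list into runs of consecutive integers.
import Mathlib
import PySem

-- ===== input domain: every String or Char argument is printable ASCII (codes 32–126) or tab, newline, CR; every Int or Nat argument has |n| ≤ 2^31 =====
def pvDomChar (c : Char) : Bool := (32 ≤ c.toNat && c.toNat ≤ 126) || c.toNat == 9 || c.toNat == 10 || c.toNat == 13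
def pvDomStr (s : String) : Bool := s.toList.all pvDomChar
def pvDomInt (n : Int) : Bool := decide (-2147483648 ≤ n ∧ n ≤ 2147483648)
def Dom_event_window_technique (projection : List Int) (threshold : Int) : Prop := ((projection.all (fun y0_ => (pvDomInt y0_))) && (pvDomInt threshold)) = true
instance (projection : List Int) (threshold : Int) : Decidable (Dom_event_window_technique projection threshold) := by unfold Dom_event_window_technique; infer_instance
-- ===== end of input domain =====

-- B replaces A's single stateful buffer-flush scan by two passes: first collect the
-- above-threshold indices, then split that flat list into runs of consecutive integers
-- (objective: alternative decomposition; same cost).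

-- ===== PORT A =====
-- the for-loop of A over enumerate(projection), state = (segments, segment)
def ewtLoopA (threshold : Int) : List (Int × Int) → List (List Int) × List Int → List (List Int) × List Int
  | [], st => st
  | (i, value) :: rest, (segments, segment) =>
    if value > threshold then
      ewtLoopA threshold rest (segments, segment ++ [i])
    else
      if segment ≠ [] then
        ewtLoopA threshold rest (segments ++ [segment], [])
      else
        ewtLoopA threshold rest (segments, segment)

def event_window_technique (projection : List Int) (threshold : Int) : List (List Int) :=
  let st := ewtLoopA threshold (PySem.List.enumerate projection) ([], [])
  if st.2 ≠ [] then st.1 ++ [st.2] else st.1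

-- ===== PORT B =====
-- the for-loop of B over the flat index list `above`, state = runs
def ewtRunsB : List Int → List (List Int) → List (List Int)
  | [], runs => runs
  | i :: rest, runs =>
    if (runs.getLast?.bind List.getLast?) = some (i - 1) then
      ewtRunsB rest (runs.dropLast ++ [(runs.getLast?.getD []) ++ [i]])
    else
      ewtRunsB rest (runs ++ [[i]])

def event_window_technique_alt (projection : List Int) (threshold : Int) : List (List Int) :=
  let above := ((PySem.List.enumerate projection).filter (fun p => decide (p.2 > threshold))).map (·.1)
  ewtRunsB above []

-- ===== PRECONDITION & SPEC =====
def Spec_event_window_technique (projection : List Int) (threshold : Int) (out : List (List Int)) : Prop := out = event_window_technique_alt projection threshold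
instance (projection : List Int) (threshold : Int) (out : List (List Int)) : Decidable (Spec_event_window_technique projection threshold out) := by unfold Spec_event_window_technique; infer_instance

-- ===== CLAIM (what is proved, stated in full; the proofs are below) =====
def Claim_equal_event_window_technique : Prop := ∀ (projection : List Int) (threshold : Int), Dom_event_window_technique projection threshold → Spec_event_window_technique projection threshold (event_window_technique projection threshold)

-- ===== LEMMAS AND PROOFS =====

-- finalization step of A (the trailing `if segment:` after the loop)
def ewtFin : List (List Int) × List Int → List (List Int)
  | (segments, segment) => if segment ≠ [] then segments ++ [segment] else segments

theorem ewtFin_eq (st : List (List Int) × List Int) :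
    ewtFin st = if st.2 ≠ [] then st.1 ++ [st.2] else st.1 := by
  cases st; rfl

-- The heart of the proof: run A's loop on `enumerate xs s` with state (segments, segment)
-- and B's loop on the remaining above-threshold indices, with B-state
-- L = segments ++ (segment if nonempty).  Invariants: an open segment ends at s-1;
-- with no open segment the last closed run ends strictly before s-1.
theorem ewt_key (threshold : Int) (xs : List Int) : ∀ (s : Int) (segments : List (List Int)) (segment : List Int),
    (segment ≠ [] → segment.getLast? = some (s - 1)) →
    (segment = [] → ∀ m, (segments.getLast?.bind List.getLast?) = some m → m < s - 1) →
    ewtFin (ewtLoopA threshold (PySem.List.enumerate xs s) (segments, segment)) =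
      ewtRunsB (((PySem.List.enumerate xs s).filter (fun p => decide (p.2 > threshold))).map (·.1))
        (segments ++ if segment = [] then [] else [segment]) := by
  induction xs with
  | nil =>
    intro s segments segment _ _
    simp only [PySem.List.enumerate_nil, List.filter_nil, List.map_nil, ewtLoopA, ewtRunsB,
      ewtFin_eq]
    by_cases h : segment = [] <;> simp [h]
  | cons x rest ih =>
    intro s segments segment hOpen hClosed
    rw [PySem.List.enumerate_cons]
    by_cases hx : x > threshold
    · -- A appends s to segment; B's `above` has s at its head
      simp only [ewtLoopA, if_pos hx, List.filter_cons, decide_eq_true hx, reduceIte,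
        List.map_cons, ewtRunsB]
      by_cases hseg : segment = []
      · -- no open segment: last closed run ends < s - 1, so B starts a new run [s]
        subst hseg
        have hne : ¬ ((segments ++ if ([] : List Int) = [] then [] else [([] : List Int)]).getLast?.bind List.getLast? = some (s - 1)) := by
          intro hc
          simp at hc
          have := hClosed rfl (s - 1) hc
          omega
        rw [if_neg hne]
        have h1 : ([s] : List Int) ≠ [] → ([s] : List Int).getLast? = some (s + 1 - 1) := by
          intro _; simp
        have h2 : ([s] : List Int) = [] → ∀ m, (segments.getLast?.bind List.getLast?) = some m → m < s + 1 - 1 := by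
          intro h; simp at h
        have := ih (s + 1) segments [s] h1 h2
        simpa using this
      · -- open segment ending at s-1: B extends its last run (which is `segment`)
        have hL : (segments ++ if segment = [] then [] else [segment]) = segments ++ [segment] := by
          simp [hseg]
        have hlast : (segments ++ [segment]).getLast? = some segment := by simp
        have hcond : ((segments ++ if segment = [] then [] else [segment]).getLast?.bind List.getLast?) = some (s - 1) := by
          rw [hL, hlast]; simpa using hOpen hseg
        rw [if_pos hcond, hL]
        have hdrop : (segments ++ [segment]).dropLast = segments := by simp
        rw [hdrop, hlast]
        have h1 : segment ++ [s] ≠ [] → (segment ++ [s]).getLast? = some (s + 1 - 1) := by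
          intro _; simp
        have h2 : segment ++ [s] = [] → ∀ m, (segments.getLast?.bind List.getLast?) = some m → m < s + 1 - 1 := by
          intro h; simp at h
        have := ih (s + 1) segments (segment ++ [s]) h1 h2
        simpa using this
    · -- below threshold: A closes the segment (if open); B skips the index
      have hdec : decide (x > threshold) = false := by simp [hx]
      simp only [ewtLoopA, if_neg hx, List.filter_cons, hdec, Bool.false_eq_true,
        reduceIte]
      by_cases hseg : segment = []
      · rw [if_neg (by simp [hseg])]
        have h2 : segment = [] → ∀ m, (segments.getLast?.bind List.getLast?) = some m → m < s + 1 - 1 := by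
          intro h m hm
          have := hClosed h m hm
          omega
        have := ih (s + 1) segments segment (by intro h; exact absurd hseg h) h2
        simpa [hseg] using this
      · rw [if_pos hseg]
        have h2 : ([] : List Int) = [] → ∀ m, ((segments ++ [segment]).getLast?.bind List.getLast?) = some m → m < s + 1 - 1 := by
          intro _ m hm
          rw [List.getLast?_append_of_ne_nil] at hm
          · have h3 : segment.getLast? = some (s - 1) := hOpen hseg
            simp [h3] at hm
            omega
          · simp
        have := ih (s + 1) (segments ++ [segment]) []
          (by intro h; exact absurd rfl h) h2
        simpa [hseg] using this

-- ===== VERDICT (by name: the statement is the Claim_ definition above) =====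
theorem event_window_technique_spec : Claim_equal_event_window_technique := by
  intro projection threshold _
  unfold Spec_event_window_technique event_window_technique event_window_technique_alt
  rw [← ewtFin_eq]
  have := ewt_key threshold projection 0 [] []
    (by intro h; exact absurd rfl h)
    (by intro _ m hm; simp at hm)
  simpa using this
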